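-- pv_equiv track=rewrite | github.com/Alex9189/autotests_course_example | Homework5/task_3.py | everything_for_your_cat
-- ===== SOURCE A (Python) =====
-- def everything_for_your_cat(cats_data):
--     # Здесь нужно написать код
--     owners_cats = {} #создаем пустой словарь, который будет хранить информацию о владельцах и их котах
--     for cat in cats_data: # итерируемся по каждому элементу в списке cats_data
--         name = cat[2] + " " + cat[3] # извлекаем из списка Имя и Фамилию владельца и соединяем их используя Конкатенацию
--         if name in owners_cats:
--             owners_cats[name].append(cat[0] + ", " + str(cat[1])) # Если владелец уже есть в словаре owners_cats, то добавляем информацию о коте в список его котов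
--         else:
--             owners_cats[name] = [cat[0] + ", " + str(cat[1])] # Если владельца нет, то создаем новую запись с информацией о коте.
--     our_str = "" #создаем пустую строку, которая будет содержать информацию о владельцах и их котах
--     for owner, cats in owners_cats.items(): # итерируемся по списку owners_cats и получаем список кортежей вида (ключ, значение) - владелец и список его котов
--         our_str += owner + ": " + "; ".join(cats) + "\n"# конкатенируем имя владельца и список его котов, список котов объединяем в строку и переходим на новую строку
--
--     return our_str
-- ===== SOURCE B (Python) =====
-- def everything_for_your_cat(cats_data):
--     owners = []
--     for cat in cats_data:
--         name = cat[2] + " " + cat[3]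
--         if name not in owners:
--             owners.append(name)
--     result = ""
--     for owner in owners:
--         cats = [cat[0] + ", " + str(cat[1]) for cat in cats_data
--                 if cat[2] + " " + cat[3] == owner]
--         result += owner + ": " + "; ".join(cats) + "\n"
--     return result
-- ===== Notes on version B (the rewrite author's own statement) =====
-- stated objective: alternative
-- what changed: B replaces A's single-pass dict grouping with a two-phase scheme: first collect the distinct owner names in first-appearance order, then for each owner re-scan cats_data and join the matching formatted cats; no dictionary is built.
import Mathlib
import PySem

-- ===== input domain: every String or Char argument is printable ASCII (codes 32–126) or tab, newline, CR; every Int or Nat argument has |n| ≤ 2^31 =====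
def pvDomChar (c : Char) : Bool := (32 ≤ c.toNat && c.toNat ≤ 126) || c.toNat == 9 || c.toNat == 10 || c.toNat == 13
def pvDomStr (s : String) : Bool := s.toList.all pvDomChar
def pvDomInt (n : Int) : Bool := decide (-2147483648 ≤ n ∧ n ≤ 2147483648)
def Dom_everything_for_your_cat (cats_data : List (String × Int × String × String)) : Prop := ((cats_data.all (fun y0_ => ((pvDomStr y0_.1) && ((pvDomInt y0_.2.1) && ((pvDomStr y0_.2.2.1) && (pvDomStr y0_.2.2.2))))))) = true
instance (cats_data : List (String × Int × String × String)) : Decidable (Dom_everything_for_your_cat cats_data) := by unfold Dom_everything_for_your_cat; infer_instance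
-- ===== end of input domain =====

-- B replaces A's dict-based single-pass grouping by a two-phase scheme (collect distinct
-- owners in first-appearance order, then re-scan per owner); alternative decomposition, same output.


-- owner name cat[2] + " " + cat[3], and the per-cat text cat[0] + ", " + str(cat[1])
def pvName (cat : String × Int × String × String) : String := cat.2.2.1 ++ " " ++ cat.2.2.2
def pvFmt (cat : String × Int × String × String) : String := cat.1 ++ ", " ++ PySem.Int.toStr cat.2.1

-- ===== PORT A =====
def everything_for_your_cat (cats_data : List (String × Int × String × String)) : String :=
  let owners_cats : PySem.Dict String (List String) :=
    cats_data.foldl (fun d cat =>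
      let name := pvName cat
      if d.contains name then
        d.modify name [] (fun l => l ++ [pvFmt cat])   -- owners_cats[name].append(...)
      else
        d.insert name [pvFmt cat]) PySem.Dict.empty
  owners_cats.items.foldl
    (fun s p => s ++ p.1 ++ ": " ++ PySem.Str.join "; " p.2 ++ "\n") ""

-- ===== PORT B =====
def everything_for_your_cat_alt (cats_data : List (String × Int × String × String)) : String :=
  let owners : List String :=
    cats_data.foldl (fun os cat => if pvName cat ∈ os then os else os ++ [pvName cat]) []
  owners.foldl
    (fun s owner =>
      s ++ owner ++ ": " ++
        PySem.Str.join "; " ((cats_data.filter (fun cat => pvName cat == owner)).map pvFmt)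
        ++ "\n") ""

-- ===== PRECONDITION & SPEC =====
def Spec_everything_for_your_cat (cats_data : List (String × Int × String × String)) (out : String) : Prop := out = everything_for_your_cat_alt cats_data
instance (cats_data : List (String × Int × String × String)) (out : String) : Decidable (Spec_everything_for_your_cat cats_data out) := by unfold Spec_everything_for_your_cat; infer_instance

-- ===== CLAIM (what is proved, stated in full; the proofs are below) =====
def Claim_equal_everything_for_your_cat : Prop := ∀ (cats_data : List (String × Int × String × String)), Dom_everything_for_your_cat cats_data → Spec_everything_for_your_cat cats_data (everything_for_your_cat cats_data)

-- ===== LEMMAS AND PROOFS =====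

-- A's if/contains branch is exactly one Dict.modify step
theorem pvStep_eq_modify (d : PySem.Dict String (List String))
    (cat : String × Int × String × String) :
    (let name := pvName cat
     if d.contains name then d.modify name [] (fun l => l ++ [pvFmt cat])
     else d.insert name [pvFmt cat])
    = d.modify (pvName cat) [] (fun l => l ++ [pvFmt cat]) := by
  by_cases h : d.contains (pvName cat) = true
  · simp [h]
  · simp only [Bool.not_eq_true] at h
    simp [h, PySem.Dict.modify, PySem.Dict.getD_of_not_contains _ _ h]

-- A's dictionary after the loop, written as a pure modify-fold
def pvDictOf (cats_data : List (String × Int × String × String)) :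
    PySem.Dict String (List String) :=
  cats_data.foldl (fun d cat => d.modify (pvName cat) [] (fun l => l ++ [pvFmt cat]))
    PySem.Dict.empty

theorem pvDict_keys (cats_data : List (String × Int × String × String)) :
    (pvDictOf cats_data).keys = PySem.Set.ofList (cats_data.map pvName) := by
  unfold pvDictOf
  rw [PySem.Dict.keys_foldl_modify_key]
  simp [PySem.Set.update_nil_left, PySem.Dict.keys_empty]

theorem pvDict_keys_nodup (cats_data : List (String × Int × String × String)) :
    (pvDictOf cats_data).keys.Nodup := by
  rw [pvDict_keys]; exact PySem.Set.nodup_ofList _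

theorem pvDict_getD (cats_data : List (String × Int × String × String)) (k : String) :
    (pvDictOf cats_data).getD k []
      = (cats_data.filter (fun cat => pvName cat == k)).map pvFmt := by
  unfold pvDictOf
  have hm := PySem.Dict.getD_foldl_modify_append
    (l := cats_data.map (fun cat => (pvName cat, pvFmt cat)))
    (d := PySem.Dict.empty) (c := k)
  rw [List.foldl_map] at hm
  simp only [hm, PySem.Dict.getD_empty, List.nil_append, List.filter_map, List.map_map]
  rfl

theorem pvOwners_eq (cats_data : List (String × Int × String × String)) :
    cats_data.foldl (fun os cat => if pvName cat ∈ os then os else os ++ [pvName cat]) []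
      = PySem.Set.ofList (cats_data.map pvName) := by
  have h : (fun (os : List String) cat => if pvName cat ∈ os then os else os ++ [pvName cat])
      = fun os cat => PySem.Set.add os (pvName cat) := by
    funext os cat; rw [PySem.Set.add_eq_ite]
  rw [h, ← PySem.Set.update_map_eq_foldl_add, PySem.Set.update_nil_left]

-- ===== VERDICT (by name: the statement is the Claim_ definition above) =====
theorem everything_for_your_cat_spec : Claim_equal_everything_for_your_cat := by
  intro cats_data _
  unfold Spec_everything_for_your_cat everything_for_your_cat everything_for_your_cat_alt
  simp only [pvStep_eq_modify]
  rw [show (cats_data.foldl (fun d cat => d.modify (pvName cat) [] (fun l => l ++ [pvFmt cat]))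
        PySem.Dict.empty) = pvDictOf cats_data from rfl]
  rw [PySem.Dict.items_eq_map_keys _ (pvDict_keys_nodup cats_data) []]
  rw [List.foldl_map, pvOwners_eq, pvDict_keys]
  simp only [pvDict_getD]
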